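-- pv_equiv track=rewrite | github.com/szyxxx/TucTuc-GeneticAlgorithm | Algoritma Genetika_TucTuc.py | hitung_jarak
-- ===== SOURCE A (Python) =====
-- def hitung_jarak(jarak, kromosom):
--     rincian_jarak = []
--     total_jarak = 0
--
--     for i in range(len(kromosom) - 1):
--         gen_pair = kromosom[i:i + 2]
--         total_jarak += jarak.get(gen_pair, 0)
--         rincian_jarak.append(f"{jarak.get(gen_pair, 0)} ({gen_pair})")
--
--     gen_pair_last = kromosom[-1] + kromosom[0]
--     total_jarak += jarak.get(gen_pair_last, 0)
--     rincian_jarak.append(f"{jarak.get(gen_pair_last, 0)} ({gen_pair_last})")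
--
--     rincian_str = " + ".join(rincian_jarak)
--     return total_jarak, rincian_str
-- ===== SOURCE B (Python) =====
-- def hitung_jarak(jarak, kromosom):
--     # Single reverse pass: walk the chromosome from its last gene to its first,
--     # carrying the successor gene; the wrap-around edge comes out first and the
--     # detail string is built back-to-front by prepending, so no edge list,
--     # no indices/slices and no join are needed.
--     total_jarak = 0
--     rincian_str = ""
--     nxt = kromosom[0]
--     for c in reversed(kromosom):
--         pair = c + nxt
--         d = jarak.get(pair, 0)
--         total_jarak += d
--         piece = f"{d} ({pair})"
--         rincian_str = piece if not rincian_str else piece + " + " + rincian_str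
--         nxt = c
--     return total_jarak, rincian_str
-- ===== Notes on version B (the rewrite author's own statement) =====
-- stated objective: alternative
-- what changed: Replaces A's forward index/slice loop plus an out-of-loop special case and a final join with a single reverse character walk that carries the successor gene, handles the wrap-around edge first, and builds the detail string back-to-front by prepending.
import Mathlib
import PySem

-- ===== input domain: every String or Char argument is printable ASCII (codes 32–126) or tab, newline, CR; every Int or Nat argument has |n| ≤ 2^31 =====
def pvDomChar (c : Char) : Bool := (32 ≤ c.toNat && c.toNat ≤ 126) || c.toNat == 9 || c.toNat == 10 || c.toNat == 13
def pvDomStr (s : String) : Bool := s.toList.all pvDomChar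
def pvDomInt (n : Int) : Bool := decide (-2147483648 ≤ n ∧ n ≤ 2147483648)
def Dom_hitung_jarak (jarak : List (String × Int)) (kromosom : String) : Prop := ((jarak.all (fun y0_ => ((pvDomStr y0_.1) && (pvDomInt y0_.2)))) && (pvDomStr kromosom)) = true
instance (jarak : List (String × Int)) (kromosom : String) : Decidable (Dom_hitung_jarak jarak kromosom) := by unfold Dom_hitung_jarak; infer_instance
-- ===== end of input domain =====

-- B replaces A's forward index/slice loop + out-of-loop wrap-around case + final join by a single
-- reverse character walk carrying the successor gene, building the detail string back-to-front.


-- f"{jarak.get(p, 0)} ({p})" as a List Char (shared literal formatting helper)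
def pvFmt (jarak : List (String × Int)) (p : List Char) : List Char :=
  PySem.Int.toChars (PySem.Dict.getD ⟨jarak⟩ (String.ofList p) 0) ++ (' ' :: '(' :: p) ++ [')']

-- ===== PORT A =====
def hitung_jarak (jarak : List (String × Int)) (kromosom : String) : Int × String :=
  let cs := kromosom.toList
  -- for i in range(len(kromosom) - 1): accumulate (rincian_jarak, total_jarak)
  let st := (PySem.List.pyRange 0 ((cs.length : Int) - 1) 1).foldl
    (fun (st : List (List Char) × Int) i =>
      let gen_pair := PySem.List.slice cs (some i) (some (i + 2))
      (st.1 ++ [pvFmt jarak gen_pair],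
       st.2 + PySem.Dict.getD ⟨jarak⟩ (String.ofList gen_pair) 0))
    ([], 0)
  -- kromosom[-1] + kromosom[0]  (total under Pre_: kromosom ≠ "")
  let gen_pair_last := [PySem.List.pyGetD cs (-1) ' ', PySem.List.pyGetD cs 0 ' ']
  let total := st.2 + PySem.Dict.getD ⟨jarak⟩ (String.ofList gen_pair_last) 0
  let rincian := st.1 ++ [pvFmt jarak gen_pair_last]
  (total, String.ofList (PySem.Chars.join (' ' :: '+' :: [' ']) rincian))

-- ===== PORT B =====
-- single reverse pass; nxt carries the successor gene, detail built by prepending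
def hitung_jarak_alt (jarak : List (String × Int)) (kromosom : String) : Int × String :=
  let cs := kromosom.toList
  let st := cs.reverse.foldl
    (fun (st : Int × List Char × Char) c =>
      let pair := [c, st.2.2]
      let d := PySem.Dict.getD ⟨jarak⟩ (String.ofList pair) 0
      (st.1 + d,
       (if st.2.1 = [] then pvFmt jarak pair
        else pvFmt jarak pair ++ (' ' :: '+' :: ' ' :: st.2.1)),
       c))
    (0, [], PySem.List.pyGetD cs 0 ' ')
  (st.1, String.ofList st.2.1)

-- ===== PRECONDITION & SPEC =====
-- A (and B) raise IndexError via kromosom[0] / kromosom[-1] on the empty string; excluded.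
def Pre_hitung_jarak (_jarak : List (String × Int)) (kromosom : String) : Prop := kromosom ≠ ""
instance (jarak : List (String × Int)) (kromosom : String) : Decidable (Pre_hitung_jarak jarak kromosom) := by unfold Pre_hitung_jarak; infer_instance
def pvWitness_hitung_jarak : (List (String × Int)) × String := ([("AB", 5)], "AB")

def Spec_hitung_jarak (jarak : List (String × Int)) (kromosom : String) (out : Int × String) : Prop := out = hitung_jarak_alt jarak kromosom
instance (jarak : List (String × Int)) (kromosom : String) (out : Int × String) : Decidable (Spec_hitung_jarak jarak kromosom out) := by unfold Spec_hitung_jarak; infer_instance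

-- ===== CLAIM =====
def Claim_equal_hitung_jarak : Prop := ∀ (jarak : List (String × Int)) (kromosom : String), Dom_hitung_jarak jarak kromosom → Pre_hitung_jarak jarak kromosom → Spec_hitung_jarak jarak kromosom (hitung_jarak jarak kromosom)

-- ===== LEMMAS AND PROOFS =====

-- last element with default (what B's nxt variable ends as)
def lastD : List Char → Char → Char
  | [], n => n
  | c :: rest, _ => lastD rest c

-- the cyclic edge list as B's reverse walk produces it (in iteration order)
def pairsRev : List Char → Char → List (List Char)
  | [], _ => []
  | c :: rest, n => [c, n] :: pairsRev rest c

-- the same edges in forward order (each gene paired with its successor, the last with h)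
def pairsFwd : List Char → Char → List (List Char)
  | [], _ => []
  | c :: rest, h => [c, rest.headD h] :: pairsFwd rest h

theorem lastD_append_singleton (xs : List Char) (x : Char) : ∀ n, lastD (xs ++ [x]) n = x := by
  induction xs with
  | nil => intro n; rfl
  | cons y ys ih => intro n; simp [lastD, ih y]

theorem lastD_reverse (l : List Char) (h : Char) : lastD l.reverse h = l.headD h := by
  cases l with
  | nil => rfl
  | cons a l' => simp [lastD_append_singleton]

theorem lastD_eq_getLast (l : List Char) (c : Char) :
    ∀ (hne : (c :: l) ≠ []), lastD l c = (c :: l).getLast hne := by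
  induction l generalizing c with
  | nil => intro _; rfl
  | cons a l' ih =>
    intro hne
    rw [List.getLast_cons (by simp)]
    exact ih a (by simp)

theorem pairsRev_append (l1 l2 : List Char) : ∀ n,
    pairsRev (l1 ++ l2) n = pairsRev l1 n ++ pairsRev l2 (lastD l1 n) := by
  induction l1 with
  | nil => intro n; simp [pairsRev, lastD]
  | cons c rest ih => intro n; simp [pairsRev, lastD, ih c]

theorem pairsRev_rev (l : List Char) (h : Char) :
    (pairsRev l.reverse h).reverse = pairsFwd l h := by
  induction l with
  | nil => simp [pairsRev, pairsFwd]
  | cons c rest ih =>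
    have hrev : (c :: rest).reverse = rest.reverse ++ [c] := by simp
    rw [hrev, pairsRev_append]
    simp [pairsRev, pairsFwd, ih, lastD_reverse]

theorem fmt_ne_nil (jarak : List (String × Int)) (p : List Char) : pvFmt jarak p ≠ [] := by
  simp [pvFmt]

theorem join_fmt_ne_nil (jarak : List (String × Int)) (acc : List (List Char)) (h : acc ≠ []) :
    PySem.Chars.join (' ' :: '+' :: [' ']) (acc.map (pvFmt jarak)) ≠ [] := by
  match acc with
  | [a] => simp [PySem.Chars.join_singleton, fmt_ne_nil jarak a]
  | a :: b :: rest =>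
    simp only [List.map_cons, PySem.Chars.join_cons_cons]
    simp [fmt_ne_nil jarak a]

-- A's fused accumulate-in-one-pass loop equals two separate passes over the same list.
theorem foldl_fused_eq (F : Int → List Char) (G : Int → Int) :
    ∀ (l : List Int) (r : List (List Char)) (t : Int),
      l.foldl (fun (st : List (List Char) × Int) i => (st.1 ++ [F i], st.2 + G i)) (r, t)
        = (r ++ l.map F, t + (l.map G).sum) := by
  intro l
  induction l with
  | nil => intro r t; simp
  | cons i l ih =>
    intro r t
    simp [List.foldl_cons, ih]
    omega

-- B's reverse walk characterized: it sums the lookups of pairsRev and joins the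
-- formatted pieces (in reverse of iteration order) onto the accumulated detail.
theorem bfold (jarak : List (String × Int)) :
    ∀ (l : List Char) (n : Char) (t : Int) (acc : List (List Char)),
      l.foldl
        (fun (st : Int × List Char × Char) c =>
          (st.1 + PySem.Dict.getD ⟨jarak⟩ (String.ofList [c, st.2.2]) 0,
           (if st.2.1 = [] then pvFmt jarak [c, st.2.2]
            else pvFmt jarak [c, st.2.2] ++ (' ' :: '+' :: ' ' :: st.2.1)),
           c))
        (t, PySem.Chars.join (' ' :: '+' :: [' ']) (acc.map (pvFmt jarak)), n)
      = (t + ((pairsRev l n).map (fun p => PySem.Dict.getD ⟨jarak⟩ (String.ofList p) 0)).sum,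
         PySem.Chars.join (' ' :: '+' :: [' ']) (((pairsRev l n).reverse ++ acc).map (pvFmt jarak)),
         lastD l n) := by
  intro l
  induction l with
  | nil => intro n t acc; simp [pairsRev, lastD]
  | cons c rest ih =>
    intro n t acc
    rw [List.foldl_cons]
    have hstep : (if PySem.Chars.join (' ' :: '+' :: [' ']) (acc.map (pvFmt jarak)) = [] then pvFmt jarak [c, n]
        else pvFmt jarak [c, n] ++ (' ' :: '+' :: ' ' :: PySem.Chars.join (' ' :: '+' :: [' ']) (acc.map (pvFmt jarak))))
        = PySem.Chars.join (' ' :: '+' :: [' ']) (([c, n] :: acc).map (pvFmt jarak)) := by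
      match acc with
      | [] => simp [PySem.Chars.join_singleton]
      | a :: as =>
        rw [if_neg (join_fmt_ne_nil jarak (a :: as) (by simp))]
        simp only [List.map_cons, PySem.Chars.join_cons_cons]
        simp
    simp only [hstep]
    rw [ih c (t + PySem.Dict.getD ⟨jarak⟩ (String.ofList [c, n]) 0) ([c, n] :: acc)]
    simp [pairsRev, lastD, List.append_assoc, add_assoc]

-- each inner slice of A, shifted one position into the tail
theorem slice_shift (x : Char) (l : List Char) (k : Nat) :
    PySem.List.slice (x :: l) (some (1 + (k : Int))) (some (1 + (k : Int) + 2))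
      = PySem.List.slice l (some (k : Int)) (some ((k : Int) + 2)) := by
  rw [show ((k : Int) + 2) = ((k : Nat) : Int) + ((2 : Nat) : Int) from by norm_num]
  rw [show (1 + (k : Int)) = ((k + 1 : Nat) : Int) from by push_cast; ring]
  rw [show ((k + 1 : Nat) : Int) + 2 = ((k + 1 : Nat) : Int) + ((2 : Nat) : Int) from by norm_num]
  rw [PySem.List.slice_natCast_add, PySem.List.slice_natCast_add]
  simp

-- A's edge list (forward slices plus the wrap-around pair) IS the forward pair list.
theorem edges_fwd_aux (rest : List Char) : ∀ (c h : Char),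
    (PySem.List.pyRange 0 (((c :: rest).length : Int) - 1) 1).map
        (fun i => PySem.List.slice (c :: rest) (some i) (some (i + 2)))
      ++ [[lastD rest c, h]]
    = pairsFwd (c :: rest) h := by
  induction rest with
  | nil =>
    intro c h
    rw [PySem.List.pyRange_one_eq_nil (by simp)]
    simp [pairsFwd, lastD]
  | cons c2 rest' ih =>
    intro c h
    have hlen : (0 : Int) < ((c :: c2 :: rest').length : Int) - 1 := by simp
    rw [PySem.List.pyRange_one_cons hlen]
    have hshift : (PySem.List.pyRange (0 + 1) (((c :: c2 :: rest').length : Int) - 1) 1).map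
          (fun i => PySem.List.slice (c :: c2 :: rest') (some i) (some (i + 2)))
        = (PySem.List.pyRange 0 (((c2 :: rest').length : Int) - 1) 1).map
          (fun i => PySem.List.slice (c2 :: rest') (some i) (some (i + 2))) := by
      rw [PySem.List.pyRange_one, PySem.List.pyRange_one]
      rw [List.map_map, List.map_map]
      have hn : ((((c :: c2 :: rest').length : Int) - 1) - (0 + 1)).toNat
          = ((((c2 :: rest').length : Int) - 1) - 0).toNat := by simp
      rw [hn]
      refine List.map_congr_left ?_
      intro k _
      simpa using slice_shift c (c2 :: rest') k
    rw [List.map_cons, hshift]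
    have hfirst : PySem.List.slice (c :: c2 :: rest') (some 0) (some (0 + 2)) = [c, c2] := by
      rw [show ((0 : Int) + 2) = ((2 : Nat) : Int) by norm_num]
      rw [PySem.List.slice_zero_start, PySem.List.slice_to_natCast]
      rfl
    rw [hfirst]
    have := ih c2 h
    simp only [lastD] at *
    rw [List.cons_append, this]
    simp [pairsFwd]

theorem edges_fwd (cs : List Char) (hne : cs ≠ []) (h : Char) :
    (PySem.List.pyRange 0 ((cs.length : Int) - 1) 1).map
        (fun i => PySem.List.slice cs (some i) (some (i + 2)))
      ++ [[PySem.List.pyGetD cs (-1) ' ', h]]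
    = pairsFwd cs h := by
  cases cs with
  | nil => exact absurd rfl hne
  | cons c rest =>
    rw [PySem.List.pyGetD_neg_one (c :: rest) ' ' hne, ← lastD_eq_getLast rest c hne]
    exact edges_fwd_aux rest c h

-- ===== VERDICT =====
theorem hitung_jarak_spec : Claim_equal_hitung_jarak := by
  intro jarak kromosom _ hpre
  unfold Spec_hitung_jarak
  have hne : kromosom.toList ≠ [] := by
    intro h
    exact hpre (by rw [← kromosom.ofList_toList, h])
  set cs := kromosom.toList with hcs
  set hd := PySem.List.pyGetD cs 0 ' ' with hhd
  have hB := bfold jarak cs.reverse hd 0 []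
  simp only [List.map_nil, PySem.Chars.join_nil, List.append_nil] at hB
  show (_, _) = (_, _)
  simp only [← hcs, ← hhd]
  rw [hB, foldl_fused_eq, pairsRev_rev]
  have hsum : ((pairsRev cs.reverse hd).map
        (fun p => PySem.Dict.getD ⟨jarak⟩ (String.ofList p) 0)).sum
      = ((pairsFwd cs hd).map
        (fun p => PySem.Dict.getD ⟨jarak⟩ (String.ofList p) 0)).sum := by
    rw [← pairsRev_rev cs hd, List.map_reverse, List.sum_reverse]
  rw [hsum, ← edges_fwd cs hne hd]
  simp [List.map_append, List.sum_append, List.map_map, Function.comp_def]
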